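-- pv_equiv track=rewrite | github.com/davi-blip/Gan | hw5.py | wizards
-- ===== SOURCE A (Python) =====
-- def wizards(grades,life,sleep):
--     i = []
--     for a in grades:
--         for b in life:
--             for c in sleep:
--                 if a == b == c:
--                     i.append(a)
--     return i
-- ===== SOURCE B (Python) =====
-- def wizards(grades, life, sleep):
--     count_life = {}
--     for b in life:
--         count_life[b] = count_life.get(b, 0) + 1
--     count_sleep = {}
--     for c in sleep:
--         count_sleep[c] = count_sleep.get(c, 0) + 1
--     out = []
--     for a in grades:
--         out += [a] * (count_life.get(a, 0) * count_sleep.get(a, 0))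
--     return out
-- ===== Notes on version B (the rewrite author's own statement) =====
-- stated objective: alternative
-- what changed: Replaces the triple nested scan with two hash-map counters built once; each grade then appends count_life[a]*count_sleep[a] copies directly, removing both inner loops.
import Mathlib
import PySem

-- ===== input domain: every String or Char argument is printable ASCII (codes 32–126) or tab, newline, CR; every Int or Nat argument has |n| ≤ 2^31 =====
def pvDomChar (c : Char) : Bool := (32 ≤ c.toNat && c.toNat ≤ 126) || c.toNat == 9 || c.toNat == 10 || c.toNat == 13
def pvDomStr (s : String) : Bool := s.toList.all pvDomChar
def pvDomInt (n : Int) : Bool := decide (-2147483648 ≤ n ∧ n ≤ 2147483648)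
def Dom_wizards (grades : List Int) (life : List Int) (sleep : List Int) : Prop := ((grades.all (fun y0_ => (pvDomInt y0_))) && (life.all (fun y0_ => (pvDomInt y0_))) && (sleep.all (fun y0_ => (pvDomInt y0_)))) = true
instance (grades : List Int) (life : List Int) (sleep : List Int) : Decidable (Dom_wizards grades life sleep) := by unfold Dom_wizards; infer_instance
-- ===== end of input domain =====

-- B replaces A's triple nested scan by two counters (life, sleep) and a single pass over grades (alternative algorithm).


-- ===== PORT A =====
def wizards (grades : List Int) (life : List Int) (sleep : List Int) : List Int :=
  grades.foldl (fun i a =>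
    life.foldl (fun i b =>
      sleep.foldl (fun i c =>
        if a == b && b == c then i ++ [a] else i) i) i) []

-- ===== PORT B =====
def wizards_alt (grades : List Int) (life : List Int) (sleep : List Int) : List Int :=
  let countLife := life.foldl (fun d b => d.insert b (d.getD b 0 + 1)) (PySem.Dict.empty : PySem.Dict Int Int)
  let countSleep := sleep.foldl (fun d c => d.insert c (d.getD c 0 + 1)) (PySem.Dict.empty : PySem.Dict Int Int)
  grades.foldl (fun out a =>
    out ++ List.replicate ((countLife.getD a 0 * countSleep.getD a 0)).toNat a) []

-- ===== PRECONDITION & SPEC =====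
def Spec_wizards (grades : List Int) (life : List Int) (sleep : List Int) (out : List Int) : Prop := out = wizards_alt grades life sleep
instance (grades : List Int) (life : List Int) (sleep : List Int) (out : List Int) : Decidable (Spec_wizards grades life sleep out) := by unfold Spec_wizards; infer_instance

-- ===== CLAIM (what is proved, stated in full; the proofs are below) =====
def Claim_equal_wizards : Prop := ∀ (grades : List Int) (life : List Int) (sleep : List Int), Dom_wizards grades life sleep → Spec_wizards grades life sleep (wizards grades life sleep)

-- ===== LEMMAS AND PROOFS =====

theorem wiz_inner (a b : Int) (sleep : List Int) (i : List Int) :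
    sleep.foldl (fun i c => if a == b && b == c then i ++ [a] else i) i
      = i ++ (if a = b then List.replicate (sleep.count a) a else []) := by
  rw [PySem.List.foldl_append_if (f := fun _ => a)]
  by_cases h : a = b
  · subst h
    congr 1
    rw [show (fun c => a == a && a == c) = (fun c => c == a) from by funext c; simp [eq_comm]]
    rw [if_pos rfl, List.map_const', List.count_eq_countP, ← List.countP_eq_length_filter]
  · simp [h, beq_iff_eq]

theorem wiz_flat (a : Int) (rest : List Int) (c : Nat) :
    (rest.map (fun b => if a = b then List.replicate c a else [])).flatten
      = List.replicate (rest.count a * c) a := by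
  induction rest with
  | nil => simp
  | cons b t ih =>
    by_cases h : a = b
    · subst h
      simp only [List.map_cons, List.flatten_cons, ih, List.count_cons_self]
      rw [if_pos trivial, Nat.succ_mul, Nat.add_comm, ← List.replicate_append_replicate]
    · simp only [List.map_cons, List.flatten_cons, if_neg h, List.nil_append, ih]
      rw [List.count_cons_of_ne (fun hc => h hc.symm)]

theorem wiz_mid (a : Int) (life sleep : List Int) (i : List Int) :
    life.foldl (fun i b =>
      sleep.foldl (fun i c => if a == b && b == c then i ++ [a] else i) i) i
      = i ++ List.replicate (life.count a * sleep.count a) a := by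
  simp only [wiz_inner]
  rw [PySem.List.foldl_append_eq_flatMap]
  rw [List.flatMap]
  rw [wiz_flat]

theorem wizards_eq (grades life sleep : List Int) :
    wizards grades life sleep = wizards_alt grades life sleep := by
  unfold wizards wizards_alt
  simp only [wiz_mid]
  apply PySem.List.foldl_congr_mem
  intro acc x _
  rw [PySem.Dict.getD_foldl_insert_add_one, PySem.Dict.getD_foldl_insert_add_one]
  simp only [PySem.Dict.getD_empty, zero_add, ← Nat.cast_mul, Int.toNat_natCast]

-- ===== VERDICT (by name: the statement is the Claim_ definition above) =====
theorem wizards_spec : Claim_equal_wizards := by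
  intro grades life sleep _
  exact wizards_eq grades life sleep
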